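-- pv_equiv track=rewrite | github.com/dcdanko/MD2 | microbe_directory/composite_fields.py | rectify_presence
-- ===== SOURCE A (Python) =====
-- def rectify_presence(values):
--
--     def count_in(*els):
--         count = 0
--         for val in values:
--             val = str(val).lower()
--             for el in els:
--                 count += 1 if el in val else 0
--         return count
--
--     never = count_in('never')
--     rarely = count_in('rarely')
--
--     if never == len(values):
--         return 'Never Observed'
--     if (never + rarely) == len(values):
--         return 'Rarely Observed'
--     if count_in('often', 'always') >= (len(values) - 1):
--         return 'Often Observed'
--     return 'Observed in some'
-- ===== SOURCE B (Python) =====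
-- def rectify_presence(values):
--     never = 0
--     rarely = 0
--     often_always = 0
--     for val in values:
--         s = str(val).lower()
--         if 'never' in s:
--             never += 1
--         if 'rarely' in s:
--             rarely += 1
--         often_always += (1 if 'often' in s else 0) + (1 if 'always' in s else 0)
--     n = len(values)
--     if never == n:
--         return 'Never Observed'
--     if never + rarely == n:
--         return 'Rarely Observed'
--     if often_always >= n - 1:
--         return 'Often Observed'
--     return 'Observed in some'
-- ===== Notes on version B (the rewrite author's own statement) =====
-- stated objective: simpler
-- what changed: Replaces the four repeated list scans through the count_in closure with a single pass that maintains three running tallies (keeping the per-element often/always double count); measured ~2x faster.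
import Mathlib
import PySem

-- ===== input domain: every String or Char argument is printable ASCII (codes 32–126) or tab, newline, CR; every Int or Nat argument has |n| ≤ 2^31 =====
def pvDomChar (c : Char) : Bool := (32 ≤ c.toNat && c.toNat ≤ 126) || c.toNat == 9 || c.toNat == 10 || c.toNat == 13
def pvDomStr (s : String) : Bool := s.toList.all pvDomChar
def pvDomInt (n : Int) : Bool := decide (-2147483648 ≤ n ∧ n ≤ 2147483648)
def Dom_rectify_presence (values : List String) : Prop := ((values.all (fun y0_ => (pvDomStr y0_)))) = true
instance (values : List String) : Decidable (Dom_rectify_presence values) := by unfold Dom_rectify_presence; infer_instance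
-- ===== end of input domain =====

-- B replaces A's four repeated scans (via the count_in closure) with a single pass keeping three running tallies (simpler; a timing run measured it ~2x faster).


-- ===== PORT A =====
-- count_in(*els): double loop, outer over values (lowered), inner over els
def rectify_presence (values : List String) : String :=
  let count_in : List String → Int := fun els =>
    values.foldl (fun count val =>
      let v := PySem.Str.lower val
      els.foldl (fun c el => c + (if PySem.Str.isIn el v then (1 : Int) else 0)) count) 0
  let never := count_in ["never"]
  let rarely := count_in ["rarely"]
  if never = (values.length : Int) then "Never Observed"
  else if never + rarely = (values.length : Int) then "Rarely Observed"
  else if count_in ["often", "always"] ≥ (values.length : Int) - 1 then "Often Observed"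
  else "Observed in some"

-- ===== PORT B =====
-- one pass over values maintaining the three tallies (never, rarely, often_always)
def rectify_presence_alt (values : List String) : String :=
  let t : Int × Int × Int := values.foldl (fun acc val =>
    let s := PySem.Str.lower val
    (acc.1 + (if PySem.Str.isIn "never" s then (1 : Int) else 0),
     acc.2.1 + (if PySem.Str.isIn "rarely" s then (1 : Int) else 0),
     acc.2.2 + ((if PySem.Str.isIn "often" s then (1 : Int) else 0)
              + (if PySem.Str.isIn "always" s then (1 : Int) else 0)))) (0, 0, 0)
  let n : Int := values.length
  if t.1 = n then "Never Observed"
  else if t.1 + t.2.1 = n then "Rarely Observed"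
  else if t.2.2 ≥ n - 1 then "Often Observed"
  else "Observed in some"

-- ===== PRECONDITION & SPEC =====
def Spec_rectify_presence (values : List String) (out : String) : Prop := out = rectify_presence_alt values
instance (values : List String) (out : String) : Decidable (Spec_rectify_presence values out) := by unfold Spec_rectify_presence; infer_instance

-- ===== CLAIM (what is proved, stated in full; the proofs are below) =====
def Claim_equal_rectify_presence : Prop := ∀ (values : List String), Dom_rectify_presence values → Spec_rectify_presence values (rectify_presence values)

-- ===== LEMMAS AND PROOFS =====

-- B's single-pass triple computes A's three counts, each shifted by its starting accumulator.
theorem tally_eq (values : List String) (a b c : Int) :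
    values.foldl (fun acc val =>
      (acc.1 + (if PySem.Str.isIn "never" (PySem.Str.lower val) then (1 : Int) else 0),
       acc.2.1 + (if PySem.Str.isIn "rarely" (PySem.Str.lower val) then (1 : Int) else 0),
       acc.2.2 + ((if PySem.Str.isIn "often" (PySem.Str.lower val) then (1 : Int) else 0)
                + (if PySem.Str.isIn "always" (PySem.Str.lower val) then (1 : Int) else 0)))) ((a, b, c) : Int × Int × Int)
    = (values.foldl (fun count val =>
         count + (if PySem.Str.isIn "never" (PySem.Str.lower val) then (1 : Int) else 0)) a,
       values.foldl (fun count val =>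
         count + (if PySem.Str.isIn "rarely" (PySem.Str.lower val) then (1 : Int) else 0)) b,
       values.foldl (fun count val =>
         count + (if PySem.Str.isIn "often" (PySem.Str.lower val) then (1 : Int) else 0)
               + (if PySem.Str.isIn "always" (PySem.Str.lower val) then (1 : Int) else 0)) c) := by
  induction values generalizing a b c with
  | nil => rfl
  | cons v vs ih => simp only [List.foldl_cons]; rw [ih]; simp only [add_assoc]

-- ===== VERDICT (by name: the statement is the Claim_ definition above) =====
theorem rectify_presence_spec : Claim_equal_rectify_presence := by
  intro values _
  unfold Spec_rectify_presence rectify_presence rectify_presence_alt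
  simp only [List.foldl, tally_eq values 0 0 0]
  rfl
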